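-- pv_equiv track=rewrite | github.com/alsdn1360/BOJ_Python | 백준/Gold/9278. 절망적인 줄/절망적인 줄.py | solve
-- ===== SOURCE A (Python) =====
-- def solve(line):
--     # 가장 첫 번째 사람이 100원이면 방법이 없음
--     if line[0] == ")":
--         return 0
--
--     n = len(line)
--
--     # i번째 사람까지 줄을 세웠을 때, 그 중 50원을 들고있는 사람이 j명인 경우의 수
--     dp = [[0 for _ in range(n // 2 + 1)] for _ in range(n + 1)]
--
--     # 아무도 없는 경우의 수를 1으로 지정
--     dp[0][0] = 1
--
--     for i in range(1, n + 1):
--         char = line[i - 1]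
--
--         for j in range(n // 2 + 1):
--             # 50원인 사람의 경우
--             if (char == "." or char == "(") and j > 0:
--                 dp[i][j] = (dp[i][j] + dp[i - 1][j - 1]) % 1000000
--
--             # 100원인 사람의 경우
--             # 50원을 가지고 있는 사람이 100원을 가지고 있는 사람보다 많거나 같아야 함
--             if (char == "." or char == ")") and j >= i - j:
--                 dp[i][j] = (dp[i][j] + dp[i - 1][j]) % 1000000
--
--     return dp[n][n // 2] % 1000000
-- ===== SOURCE B (Python) =====
-- def solve(line):
--     # Backward (suffix) DP over the running balance #fifties - #hundreds:
--     # w[b] = number of valid ways to finish the line when the people placed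
--     # so far leave balance b; computed right-to-left, answer is w[0].
--     # (A runs forward over the count of fifty-holders instead.)
--     n = len(line)
--     M = 1000000
--     w = [0] * (n + 2)
--     if n % 2 == 0:
--         w[0] = 1
--     for i in range(n - 1, -1, -1):
--         c = line[i]
--         nw = [0] * (n + 2)
--         for b in range(n + 1):
--             t = 0
--             if c == "." or c == "(":
--                 t = w[b + 1] % M
--             if (c == "." or c == ")") and b >= 1:
--                 t = (t + w[b - 1]) % M
--             nw[b] = t
--         w = nw
--     return w[0] % M
-- ===== Notes on version B (the rewrite author's own statement) =====
-- stated objective: alternative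
-- what changed: B replaces A's forward DP over (people placed, number of fifty-holders) by a backward suffix DP over the running balance #fifties - #hundreds: it seeds the end-of-line condition (balance 0, even length) and sweeps the string right-to-left, reading the answer at balance 0; equivalence is the forward/backward adjointness of the two recurrences.
import Mathlib
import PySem

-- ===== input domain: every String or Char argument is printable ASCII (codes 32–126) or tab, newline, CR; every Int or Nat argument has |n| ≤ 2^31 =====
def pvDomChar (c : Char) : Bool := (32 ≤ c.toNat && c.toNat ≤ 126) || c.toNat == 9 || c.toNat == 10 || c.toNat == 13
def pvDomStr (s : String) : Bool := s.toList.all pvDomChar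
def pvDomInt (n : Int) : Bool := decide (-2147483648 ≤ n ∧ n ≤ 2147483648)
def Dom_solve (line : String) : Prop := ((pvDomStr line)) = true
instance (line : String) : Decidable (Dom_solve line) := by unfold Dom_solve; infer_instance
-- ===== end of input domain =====

-- B replaces A's forward DP over (people placed, fifty-holders) by a backward suffix DP over
-- the running balance #fifties − #hundreds (answer read at balance 0); same values, same cost.

-- ===== PORT A =====
-- inner j-loop of A: dp[i][j] is written once per j from row i-1 values, so it is a map over j
def rowStep (c : Char) (prev : List Int) (n2 : Nat) (i : Nat) : List Int :=
  (List.range (n2 + 1)).map (fun j =>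
    let v : Int := if (c = '.' ∨ c = '(') ∧ 0 < j then (0 + prev.getD (j - 1) 0) % 1000000 else 0
    if (c = '.' ∨ c = ')') ∧ (j : Int) ≥ (i : Int) - (j : Int) then (v + prev.getD j 0) % 1000000 else v)

def solve (line : String) : Int :=
  match PySem.Str.pyGet? line 0 with
  | none => 0  -- line[0] raises IndexError on the empty string: excluded by Pre_solve
  | some c0 =>
    if c0 = ')' then 0
    else
      let cs := line.toList
      let n := cs.length
      let n2 := n / 2
      -- the zero table with dp[0][0] = 1; rows 1..n are produced by the i-loop
      let row0 : List Int := (List.range (n2 + 1)).map (fun j => if j = 0 then (1 : Int) else 0)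
      let rows := (List.range' 1 n).foldl
        (fun rows i => rows ++ [rowStep (cs.getD (i - 1) ' ') (rows.getD (i - 1) []) n2 i]) [row0]
      (rows.getD n []).getD n2 0 % 1000000

-- ===== PORT B =====
-- one backward step of B: from the suffix table w build the table nw for one more person in front
def bStep (c : Char) (n : Nat) (w : List Int) : List Int :=
  (List.range (n + 1)).map (fun b =>
    let t : Int := if c = '.' ∨ c = '(' then w.getD (b + 1) 0 % 1000000 else 0
    if (c = '.' ∨ c = ')') ∧ 1 ≤ b then (t + w.getD (b - 1) 0) % 1000000 else t) ++ [0]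

def solve_alt (line : String) : Int :=
  let cs := line.toList
  let n := cs.length
  let w0 : List Int := (if n % 2 = 0 then (1 : Int) else 0) :: List.replicate (n + 1) 0
  let w := cs.foldr (fun c w => bStep c n w) w0
  w.getD 0 0 % 1000000

-- ===== PRECONDITION & SPEC =====
-- Pre_ excludes only the empty string, on which A raises IndexError at line[0].
def Pre_solve (line : String) : Prop := line ≠ ""
instance (line : String) : Decidable (Pre_solve line) := by unfold Pre_solve; infer_instance
def pvWitness_solve : String := "(.)"

def Spec_solve (line : String) (out : Int) : Prop := out = solve_alt line
instance (line : String) (out : Int) : Decidable (Spec_solve line out) := by unfold Spec_solve; infer_instance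

-- ===== CLAIM (what is proved, stated in full; the proofs are below) =====
def Claim_equal_solve : Prop := ∀ (line : String), Dom_solve line → Pre_solve line → Spec_solve line (solve line)

-- ===== LEMMAS AND PROOFS =====

-- ---------- A side: the table equals the mod-valued forward recursion g ----------
def g (cs : List Char) : Nat → Nat → Int
  | 0, j => if j = 0 then 1 else 0
  | i + 1, j =>
    let c := cs.getD i ' '
    let v : Int := if (c = '.' ∨ c = '(') ∧ 0 < j then (0 + g cs i (j - 1)) % 1000000 else 0
    if (c = '.' ∨ c = ')') ∧ (j : Int) ≥ ((i : Int) + 1) - (j : Int) then (v + g cs i j) % 1000000 else v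

lemma rowStep_eq (cs : List Char) (n2 i : Nat) :
    rowStep (cs.getD i ' ') ((List.range (n2 + 1)).map (g cs i)) n2 (i + 1)
      = (List.range (n2 + 1)).map (g cs (i + 1)) := by
  unfold rowStep
  apply List.map_congr_left
  intro j hj
  simp only [List.mem_range] at hj
  rw [PySem.List.getD_map_range _ _ _ _ (by omega), PySem.List.getD_map_range _ _ _ _ hj]
  show _ = g cs (i + 1) j
  simp only [g]
  push_cast
  rfl

lemma rows_fold (cs : List Char) (n2 : Nat) : ∀ n : Nat,
    (List.range' 1 n).foldl
      (fun rows i => rows ++ [rowStep (cs.getD (i - 1) ' ') (rows.getD (i - 1) []) n2 i])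
      [(List.range (n2 + 1)).map (fun j => if j = 0 then (1 : Int) else 0)]
    = (List.range (n + 1)).map (fun i => (List.range (n2 + 1)).map (g cs i)) := by
  intro n
  induction n with
  | zero =>
    simp [List.range_succ, g]
  | succ n ih =>
    rw [List.range'_concat, List.foldl_append, ih]
    simp only [List.foldl_cons, List.foldl_nil]
    have h1 : 1 + 1 * n - 1 = n := by omega
    rw [h1]
    rw [PySem.List.getD_map_range _ _ _ _ (by omega)]
    have h2 : 1 + 1 * n = n + 1 := by omega
    rw [h2, rowStep_eq]
    rw [List.range_succ (n := n + 1), List.map_append]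
    simp

-- ---------- B side: the suffix table equals the mod-valued backward recursion W ----------
def W (e : Bool) : List Char → Nat → Int
  | [], b => if b = 0 ∧ e then 1 else 0
  | c :: s, b =>
    let t : Int := if c = '.' ∨ c = '(' then W e s (b + 1) % 1000000 else 0
    if (c = '.' ∨ c = ')') ∧ 1 ≤ b then (t + W e s (b - 1)) % 1000000 else t

lemma W_support (e : Bool) : ∀ (s : List Char) (b : Nat), s.length < b → W e s b = 0 := by
  intro s
  induction s with
  | nil => intro b hb; simp [W]; omega
  | cons c s ih =>
    intro b hb
    simp only [W]
    rw [ih (b + 1) (by simp at hb; omega), ih (b - 1) (by simp at hb ⊢; omega)]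
    split_ifs <;> norm_num

lemma getD_tab (f : Nat → Int) (n b : Nat) (hb : b ≤ n) :
    ((List.range (n + 1)).map f ++ [(0 : Int)]).getD b 0 = f b := by
  rw [List.getD_append _ _ _ _ (by simp; omega)]
  exact PySem.List.getD_map_range _ _ _ _ (by omega)

lemma getD_tab_top (f : Nat → Int) (n : Nat) :
    ((List.range (n + 1)).map f ++ [(0 : Int)]).getD (n + 1) 0 = 0 := by
  have : ((List.range (n + 1)).map f).length = n + 1 := by simp
  rw [List.getD_eq_getElem?_getD, List.getElem?_append_right (by simp)]
  simp

lemma foldr_bStep (n : Nat) : ∀ (s : List Char), s.length ≤ n →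
    s.foldr (fun c w => bStep c n w)
        ((if n % 2 = 0 then (1 : Int) else 0) :: List.replicate (n + 1) 0)
      = (List.range (n + 1)).map (fun b => W (Decidable.decide (n % 2 = 0)) s b) ++ [0] := by
  intro s
  induction s with
  | nil =>
    intro _
    rw [List.foldr_nil, List.range_succ_eq_map, List.map_cons, List.map_map]
    have h1 : (List.range n).map ((fun b => W (Decidable.decide (n % 2 = 0)) [] b) ∘ Nat.succ)
        = List.replicate n 0 := by
      rw [List.eq_replicate_iff]
      refine ⟨by simp, ?_⟩
      intro x hx
      simp only [List.mem_map] at hx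
      obtain ⟨a, -, ha⟩ := hx
      rw [← ha]
      simp [W]
    rw [h1]
    have h2 : W (Decidable.decide (n % 2 = 0)) [] 0 = if n % 2 = 0 then (1 : Int) else 0 := by
      simp [W]
    rw [h2]
    simp [List.replicate_succ']
  | cons c s ih =>
    intro hlen
    rw [List.foldr_cons, ih (by simp at hlen; omega)]
    unfold bStep
    congr 1
    apply List.map_congr_left
    intro b hb
    simp only [List.mem_range] at hb
    have hget1 : ((List.range (n + 1)).map (fun b => W (Decidable.decide (n % 2 = 0)) s b) ++ [(0:Int)]).getD (b + 1) 0
        = W (Decidable.decide (n % 2 = 0)) s (b + 1) := by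
      rcases Nat.lt_or_ge b n with h | h
      · exact getD_tab _ _ _ (by omega)
      · have hb1 : b = n := by omega
        subst hb1
        rw [getD_tab_top]
        rw [W_support _ _ _ (by simp at hlen; omega)]
    have hget2 : ((List.range (n + 1)).map (fun b => W (Decidable.decide (n % 2 = 0)) s b) ++ [(0:Int)]).getD (b - 1) 0
        = W (Decidable.decide (n % 2 = 0)) s (b - 1) := getD_tab _ _ _ (by omega)
    rw [hget1, hget2]
    show _ = W (Decidable.decide (n % 2 = 0)) (c :: s) b
    simp only [W]

lemma solve_alt_eq_W (line : String) :
    solve_alt line = W (Decidable.decide (line.toList.length % 2 = 0)) line.toList 0 % 1000000 := by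
  unfold solve_alt
  dsimp only
  rw [foldr_bStep _ _ le_rfl, getD_tab _ _ _ (by omega)]

-- ---------- exact (ℕ-valued) counts and the forward/backward equivalence ----------
def Pf (cs : List Char) : Nat → Nat → Nat
  | 0, j => if j = 0 then 1 else 0
  | i + 1, j =>
    (if (cs.getD i ' ' = '.' ∨ cs.getD i ' ' = '(') ∧ 0 < j then Pf cs i (j - 1) else 0)
    + (if (cs.getD i ' ' = '.' ∨ cs.getD i ' ' = ')') ∧ i + 1 ≤ 2 * j then Pf cs i j else 0)

def Qf (cs : List Char) : Nat → Nat → Nat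
  | 0, b => if b = 0 then 1 else 0
  | i + 1, b =>
    (if (cs.getD i ' ' = '.' ∨ cs.getD i ' ' = '(') ∧ 1 ≤ b then Qf cs i (b - 1) else 0)
    + (if (cs.getD i ' ' = '.' ∨ cs.getD i ' ' = ')') then Qf cs i (b + 1) else 0)

def Cf (e : Bool) : List Char → Nat → Nat
  | [], b => if b = 0 ∧ e then 1 else 0
  | c :: s, b =>
    (if c = '.' ∨ c = '(' then Cf e s (b + 1) else 0)
    + (if (c = '.' ∨ c = ')') ∧ 1 ≤ b then Cf e s (b - 1) else 0)

lemma g_eq_Pf (cs : List Char) : ∀ i j, g cs i j = (Pf cs i j : Int) % 1000000 := by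
  intro i
  induction i with
  | zero => intro j; by_cases hj : j = 0 <;> simp [g, Pf, hj]
  | succ i ih =>
    intro j
    simp only [g, Pf]
    rw [ih (j - 1), ih j]
    have hv : (if (cs.getD i ' ' = '.' ∨ cs.getD i ' ' = '(') ∧ 0 < j then (0 + (Pf cs i (j-1) : Int) % 1000000) % 1000000 else 0)
        = ((if (cs.getD i ' ' = '.' ∨ cs.getD i ' ' = '(') ∧ 0 < j then (Pf cs i (j-1) : Int) else 0)) % 1000000 := by
      split_ifs <;> omega
    rw [hv]
    have hcong : ((cs.getD i ' ' = '.' ∨ cs.getD i ' ' = ')') ∧ (j : Int) ≥ ((i : Int) + 1) - (j : Int))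
        ↔ ((cs.getD i ' ' = '.' ∨ cs.getD i ' ' = ')') ∧ i + 1 ≤ 2 * j) := by
      constructor <;> (rintro ⟨h1, h2⟩; exact ⟨h1, by omega⟩)
    rw [if_congr hcong rfl rfl]
    push_cast
    split_ifs <;> omega

lemma W_eq_Cf (e : Bool) : ∀ (s : List Char) (b : Nat), W e s b = (Cf e s b : Int) % 1000000 := by
  intro s
  induction s with
  | nil => intro b; by_cases h : b = 0 ∧ e = true <;> simp [W, Cf] <;> omega
  | cons c s ih =>
    intro b
    simp only [W, Cf]
    rw [ih (b + 1), ih (b - 1)]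
    push_cast
    split_ifs <;> omega

lemma Pf_zero (cs : List Char) : ∀ i j, 2 * j < i → Pf cs i j = 0 := by
  intro i
  induction i with
  | zero => intro j h; omega
  | succ i ih =>
    intro j h
    simp only [Pf]
    have h2 : ¬ ((cs.getD i ' ' = '.' ∨ cs.getD i ' ' = ')') ∧ i + 1 ≤ 2 * j) := by
      rintro ⟨-, hh⟩; omega
    rw [if_neg h2]
    by_cases h1 : (cs.getD i ' ' = '.' ∨ cs.getD i ' ' = '(') ∧ 0 < j
    · rw [if_pos h1, ih (j - 1) (by omega)]
    · rw [if_neg h1]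

lemma Qf_support (cs : List Char) : ∀ i b, i < b → Qf cs i b = 0 := by
  intro i
  induction i with
  | zero => intro b h; simp [Qf]; omega
  | succ i ih =>
    intro b h
    simp only [Qf]
    rw [ih (b + 1) (by omega)]
    by_cases h1 : (cs.getD i ' ' = '.' ∨ cs.getD i ' ' = '(') ∧ 1 ≤ b
    · rw [if_pos h1, ih (b - 1) (by omega)]; simp
    · rw [if_neg h1]; simp

lemma Pf_eq_Qf (cs : List Char) : ∀ i j, i ≤ 2 * j → Pf cs i j = Qf cs i (2 * j - i) := by
  intro i
  induction i with
  | zero => intro j _; simp only [Pf, Qf]; exact if_congr (by omega) rfl rfl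
  | succ i ih =>
    intro j h
    simp only [Pf, Qf]
    congr 1
    · by_cases hf : cs.getD i ' ' = '.' ∨ cs.getD i ' ' = '('
      · by_cases hb : 1 ≤ 2 * j - (i + 1)
        · rw [if_pos ⟨hf, by omega⟩, if_pos ⟨hf, hb⟩, ih (j - 1) (by omega)]
          congr 1
          omega
        · -- b = 0 : forward term is Pf i (j-1) with 2*(j-1) < i, i.e. 0
          rw [if_neg (by rintro ⟨-, hh⟩; omega : ¬ ((cs.getD i ' ' = '.' ∨ cs.getD i ' ' = '(') ∧ 1 ≤ 2 * j - (i + 1)))]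
          by_cases hj : 0 < j
          · rw [if_pos ⟨hf, hj⟩, Pf_zero cs i (j - 1) (by omega)]
          · rw [if_neg (by rintro ⟨-, hh⟩; omega)]
      · rw [if_neg (by rintro ⟨hh, -⟩; exact hf hh), if_neg (by rintro ⟨hh, -⟩; exact hf hh)]
    · by_cases hh : cs.getD i ' ' = '.' ∨ cs.getD i ' ' = ')'
      · rw [if_pos ⟨hh, h⟩, if_pos hh, ih j (by omega)]
        congr 1
        omega
      · rw [if_neg (by rintro ⟨h1, -⟩; exact hh h1), if_neg hh]

lemma adjoint (cs : List Char) (e : Bool) : ∀ k, k ≤ cs.length →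
    (Finset.range (cs.length + 2)).sum (fun b => Qf cs k b * Cf e (cs.drop k) b) = Cf e cs 0 := by
  intro k
  induction k with
  | zero =>
    intro _
    rw [List.drop_zero]
    rw [Finset.sum_eq_single 0]
    · simp [Qf]
    · intro b _ hb; simp [Qf, hb]
    · intro h; exact absurd (Finset.mem_range.mpr (by omega)) h
  | succ k ih =>
    intro hk
    have hklt : k < cs.length := by omega
    have hdrop : cs.drop k = cs.getD k ' ' :: cs.drop (k + 1) := by
      rw [List.getD_eq_getElem _ _ hklt, List.drop_eq_getElem_cons hklt]
    rw [← ih (by omega), hdrop]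
    set c := cs.getD k ' ' with hc
    set s' := cs.drop (k + 1) with hs'
    set N := cs.length with hN
    -- expand both sides into fifty- and hundred-parts and shift indices
    have lhs_split : (Finset.range (N + 2)).sum (fun b => Qf cs (k + 1) b * Cf e s' b)
        = (Finset.range (N + 2)).sum (fun b => (if (c = '.' ∨ c = '(') ∧ 1 ≤ b then Qf cs k (b - 1) else 0) * Cf e s' b)
        + (Finset.range (N + 2)).sum (fun b => (if (c = '.' ∨ c = ')') then Qf cs k (b + 1) else 0) * Cf e s' b) := by
      rw [← Finset.sum_add_distrib]
      apply Finset.sum_congr rfl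
      intro b _
      simp only [Qf, ← hc]
      ring
    have rhs_split : (Finset.range (N + 2)).sum (fun b => Qf cs k b * Cf e (c :: s') b)
        = (Finset.range (N + 2)).sum (fun b => Qf cs k b * (if c = '.' ∨ c = '(' then Cf e s' (b + 1) else 0))
        + (Finset.range (N + 2)).sum (fun b => Qf cs k b * (if (c = '.' ∨ c = ')') ∧ 1 ≤ b then Cf e s' (b - 1) else 0)) := by
      rw [← Finset.sum_add_distrib]
      apply Finset.sum_congr rfl
      intro b _
      simp only [Cf]
      ring
    rw [lhs_split, rhs_split]
    congr 1
    · -- fifty part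
      rw [Finset.sum_range_succ' (fun b => (if (c = '.' ∨ c = '(') ∧ 1 ≤ b then Qf cs k (b - 1) else 0) * Cf e s' b) (N + 1)]
      rw [Finset.sum_range_succ (fun b => Qf cs k b * (if c = '.' ∨ c = '(' then Cf e s' (b + 1) else 0)) (N + 1)]
      rw [Qf_support cs k (N + 1) (by omega)]
      have hneg : ∀ P : Prop, [inst : Decidable (P ∧ (1:Nat) ≤ 0)] → (if P ∧ (1:Nat) ≤ 0 then Qf cs k (0 - 1) else 0) = 0 := by
        intro P _; rw [if_neg (by rintro ⟨-, hh⟩; omega)]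
      rw [hneg]
      simp only [Nat.add_sub_cancel, zero_mul, add_zero]
      apply Finset.sum_congr rfl
      intro b _
      by_cases hf : c = '.' ∨ c = '('
      · rw [if_pos ⟨hf, by omega⟩, if_pos hf]
      · rw [if_neg (by rintro ⟨hh, -⟩; exact hf hh), if_neg hf]
        simp
    · -- hundred part
      rw [Finset.sum_range_succ (fun b => (if (c = '.' ∨ c = ')') then Qf cs k (b + 1) else 0) * Cf e s' b) (N + 1)]
      rw [Finset.sum_range_succ' (fun b => Qf cs k b * (if (c = '.' ∨ c = ')') ∧ 1 ≤ b then Cf e s' (b - 1) else 0)) (N + 1)]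
      rw [Qf_support cs k (N + 2) (by omega)]
      have h0 : Qf cs k 0 * (if (c = '.' ∨ c = ')') ∧ (1:Nat) ≤ 0 then Cf e s' (0 - 1) else 0) = 0 := by
        rw [if_neg (by rintro ⟨-, hh⟩; omega)]
        ring
      rw [h0, ite_self, zero_mul, add_zero, add_zero]
      apply Finset.sum_congr rfl
      intro b _
      by_cases hf : c = '.' ∨ c = ')'
      · rw [if_pos hf, if_pos ⟨hf, by omega⟩, Nat.add_sub_cancel]
      · rw [if_neg hf, if_neg (by rintro ⟨hh, -⟩; exact hf hh)]
        simp

lemma main_exact (cs : List Char) :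
    Pf cs cs.length (cs.length / 2) = Cf (Decidable.decide (cs.length % 2 = 0)) cs 0 := by
  have hadj := adjoint cs (decide (cs.length % 2 = 0)) cs.length le_rfl
  rw [List.drop_length] at hadj
  have hsum : (Finset.range (cs.length + 2)).sum
      (fun b => Qf cs cs.length b * Cf (Decidable.decide (cs.length % 2 = 0)) [] b)
      = Qf cs cs.length 0 * Cf (Decidable.decide (cs.length % 2 = 0)) [] 0 := by
    rw [Finset.sum_eq_single 0]
    · intro b _ hb; simp [Cf, hb]
    · intro h; exact absurd (Finset.mem_range.mpr (by omega)) h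
  rw [hsum] at hadj
  by_cases he : cs.length % 2 = 0
  · have h2 : 2 * (cs.length / 2) = cs.length := by omega
    rw [Pf_eq_Qf cs cs.length (cs.length / 2) (by omega), h2, Nat.sub_self, ← hadj]
    simp [Cf, he]
  · rw [Pf_zero cs cs.length (cs.length / 2) (by omega), ← hadj]
    simp [Cf, he]

lemma solve_alt_eq_exact (line : String) :
    solve_alt line = (Pf line.toList line.toList.length (line.toList.length / 2) : Int) % 1000000 := by
  rw [solve_alt_eq_W, W_eq_Cf, main_exact]
  omega

-- ===== VERDICT (by name: the statement is the Claim_ definition above) =====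
theorem solve_spec : Claim_equal_solve := by
  intro line _ hPre
  unfold Spec_solve
  obtain ⟨c, rest, hcs⟩ : ∃ c rest, line.toList = c :: rest := by
    cases h : line.toList with
    | nil => exact absurd (String.toList_eq_nil_iff.mp h) hPre
    | cons c rest => exact ⟨c, rest, rfl⟩
  have hget : PySem.Str.pyGet? line 0 = some c := by
    simp [pysem, hcs]
  unfold solve
  rw [hget]
  simp only []
  by_cases hc0 : c = ')'
  · rw [if_pos hc0, solve_alt_eq_W, W_eq_Cf]
    have hz : Cf (Decidable.decide (line.toList.length % 2 = 0)) line.toList 0 = 0 := by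
      rw [hcs, hc0]
      simp only [Cf]
      rw [if_neg (by rintro (hh | hh) <;> simp at hh),
          if_neg (by rintro ⟨-, hh⟩; omega)]
    rw [hz]
    rfl
  · rw [if_neg hc0]
    rw [rows_fold, PySem.List.getD_map_range _ _ _ _ (by omega),
        PySem.List.getD_map_range _ _ _ _ (by omega), g_eq_Pf, solve_alt_eq_exact]
    omega
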